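-- pv_equiv track=rewrite | github.com/francois07/advent-of-code-2020 | day11/d11p2.py | occupied_rule
-- ===== SOURCE A (Python) =====
-- def count_adjacent_occupied(data, x, y):
--     res = 0
--     found = []
--     for i in range(1, len(data)):
--         coords = [(y-i, x), (y, x+i), (y+i, x), (y, x-i),
--                   (y-i, x+i), (y-i, x-i), (y+i, x-i), (y+i, x+i)]
--         step = []
--         for i, c in enumerate(coords):
--             if (0 <= c[0] < len(data)) and (0 <= c[1] < len(data[0])) and i not in found:
--                 if data[c[0]][c[1]] == "#":
--                     found.append(i)
--                 step.append(data[c[0]][c[1]])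
--         res += step.count("#")
--     return res
--
-- def occupied_rule(data):
--     res = []
--     for i, row in enumerate(data):
--         for j, seat in enumerate(row):
--             if seat == '#':
--                 if count_adjacent_occupied(data, j, i) >= 5:
--                     res.append((i, j))
--     return res
-- ===== SOURCE B (Python) =====
-- def occupied_rule(data):
--     res = []
--     rows = len(data)
--     cols = len(data[0]) if data else 0
--     dirs = [(-1, 0), (0, 1), (1, 0), (0, -1),
--             (-1, 1), (-1, -1), (1, -1), (1, 1)]
--
--     def sees(i, j, dy, dx):
--         # first '#' along the ray (looking through any cell, like A), probing
--         # at most rows-1 steps (A's radius cap); early exit at the first hit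
--         for k in range(1, rows):
--             y, x = i + k * dy, j + k * dx
--             if 0 <= y < rows and 0 <= x < cols and data[y][x] == '#':
--                 return True
--         return False
--
--     for i, row in enumerate(data):
--         for j, seat in enumerate(row):
--             if seat == '#' and sum(sees(i, j, dy, dx) for dy, dx in dirs) >= 5:
--                 res.append((i, j))
--     return res
-- ===== Notes on version B (the rewrite author's own statement) =====
-- stated objective: alternative
-- what changed: B scans each of the 8 rays direction-by-direction with an early exit at the first visible '#', instead of A's radius-synchronized sweep that rebuilds an 8-coordinate list, a step list and a found list at every radius; same worst-case cost, no per-radius list bookkeeping.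
import Mathlib
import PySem

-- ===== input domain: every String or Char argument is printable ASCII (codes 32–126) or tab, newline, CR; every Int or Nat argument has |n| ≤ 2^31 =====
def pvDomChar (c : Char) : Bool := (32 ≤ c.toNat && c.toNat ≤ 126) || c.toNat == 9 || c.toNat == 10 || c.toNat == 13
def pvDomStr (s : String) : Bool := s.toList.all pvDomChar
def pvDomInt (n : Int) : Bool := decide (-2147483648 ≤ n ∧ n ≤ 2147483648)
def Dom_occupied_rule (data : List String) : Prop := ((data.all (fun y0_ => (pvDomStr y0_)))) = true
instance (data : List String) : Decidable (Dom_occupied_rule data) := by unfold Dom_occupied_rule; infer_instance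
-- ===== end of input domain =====

-- B replaces A's radius-synchronized sweep (rebuilding coord/step/found lists at every
-- radius) by a direction-major ray scan with an early exit at the first visible '#';
-- an alternative decomposition of the same computation.

-- ===== PORT A =====
-- shared indexing helpers: data[y][x] (exact under Pre_: every access the ports make is
-- guarded to be in range of a rectangular grid) and len(data[0])
def pvCell (data : List String) (y x : Int) : Char :=
  (PySem.Str.pyGet? ((PySem.List.pyGet? data y).getD "") x).getD ' '

def pvCols (data : List String) : Int :=
  PySem.Str.len ((PySem.List.pyGet? data 0).getD "")

-- the body of A's inner `for i, c in enumerate(coords)` loop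
def count_adjacent_step (data : List String) (fs : List Int × List Char)
    (dc : Int × (Int × Int)) : List Int × List Char :=
  if 0 ≤ dc.2.1 ∧ dc.2.1 < (data.length : Int) ∧ 0 ≤ dc.2.2 ∧ dc.2.2 < pvCols data
      ∧ ¬ fs.1.contains dc.1 then
    ((if pvCell data dc.2.1 dc.2.2 = '#' then fs.1 ++ [dc.1] else fs.1),
     fs.2 ++ [pvCell data dc.2.1 dc.2.2])
  else fs

-- the body of A's outer `for i in range(1, len(data))` loop
def count_adjacent_radius (data : List String) (x y : Int) (st : Int × List Int)
    (r : Int) : Int × List Int :=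
  let coords : List (Int × Int) :=
    [(y - r, x), (y, x + r), (y + r, x), (y, x - r),
     (y - r, x + r), (y - r, x - r), (y + r, x - r), (y + r, x + r)]
  let fs := (PySem.List.enumerate coords).foldl (count_adjacent_step data) (st.2, ([] : List Char))
  (st.1 + (PySem.List.count fs.2 '#' : Int), fs.1)

def count_adjacent_occupied (data : List String) (x y : Int) : Int :=
  ((PySem.List.pyRange 1 (data.length : Int)).foldl (count_adjacent_radius data x y)
    ((0 : Int), ([] : List Int))).1

def occupied_rule (data : List String) : List (Int × Int) :=
  (PySem.List.enumerate data).foldl (fun res ir =>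
    (PySem.List.enumerate ir.2.toList).foldl (fun res js =>
      if js.2 = '#' then
        if 5 ≤ count_adjacent_occupied data js.1 ir.1 then res ++ [(ir.1, js.1)] else res
      else res) res) []

-- ===== PORT B =====
def pvDirs : List (Int × Int) :=
  [(-1, 0), (0, 1), (1, 0), (0, -1), (-1, 1), (-1, -1), (1, -1), (1, 1)]

-- B's `sees`: walk the ray, returning at the first visible '#' (looking through any cell, like A)
def pvSees (data : List String) (rows cols i j dy dx : Int) : List Int → Bool
  | [] => false
  | k :: ks =>
    let y := i + k * dy
    let x := j + k * dx
    if (0 ≤ y ∧ y < rows ∧ 0 ≤ x ∧ x < cols) ∧ pvCell data y x = '#' then true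
    else pvSees data rows cols i j dy dx ks

def occupied_rule_alt (data : List String) : List (Int × Int) :=
  let rows : Int := data.length
  let cols : Int := if data ≠ [] then pvCols data else 0
  (PySem.List.enumerate data).foldl (fun res ir =>
    (PySem.List.enumerate ir.2.toList).foldl (fun res js =>
      if js.2 = '#' ∧ 5 ≤ pvDirs.countP
          (fun d => pvSees data rows cols ir.1 js.1 d.1 d.2 (PySem.List.pyRange 1 rows)) then
        res ++ [(ir.1, js.1)]
      else res) res) []

-- ===== PRECONDITION & SPEC =====
-- Pre_ excludes exactly the inputs on which A raises IndexError: grids where some probe of an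
-- occupied seat (any radius 1..rows-1, any of the 8 directions) passes the bounds check, which
-- uses row 0's length for every row, but lands beyond the end of a shorter row.
def Pre_occupied_rule (data : List String) : Prop :=
  ∀ ir ∈ PySem.List.enumerate data 0, ∀ js ∈ PySem.List.enumerate ir.2.toList 0,
    js.2 = '#' →
    ∀ r ∈ PySem.List.pyRange 1 (data.length : Int), ∀ d ∈ pvDirs,
      0 ≤ ir.1 + r * d.1 → ir.1 + r * d.1 < (data.length : Int) →
      0 ≤ js.1 + r * d.2 → js.1 + r * d.2 < pvCols data →
      js.1 + r * d.2 < (((PySem.List.pyGet? data (ir.1 + r * d.1)).getD "").toList.length : Int)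
instance (data : List String) : Decidable (Pre_occupied_rule data) := by
  unfold Pre_occupied_rule; infer_instance

def pvWitness_occupied_rule : List String := ["##", "#L"]

def Spec_occupied_rule (data : List String) (out : List (Int × Int)) : Prop := out = occupied_rule_alt data
instance (data : List String) (out : List (Int × Int)) : Decidable (Spec_occupied_rule data out) := by unfold Spec_occupied_rule; infer_instance

-- ===== CLAIM (what is proved, stated in full; the proofs are below) =====
def Claim_equal_occupied_rule : Prop := ∀ (data : List String), Dom_occupied_rule data → Pre_occupied_rule data → Spec_occupied_rule data (occupied_rule data)

-- ===== LEMMAS AND PROOFS =====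

-- Bool guards used to characterise both loops:
def pvG (data : List String) (c : Int × Int) : Bool :=
  decide (0 ≤ c.1 ∧ c.1 < (data.length : Int) ∧ 0 ≤ c.2 ∧ c.2 < pvCols data)

def pvHitB (data : List String) (i j : Int) (d : Int × Int) (k : Int) : Bool :=
  pvG data (i + k * d.1, j + k * d.2) && (pvCell data (i + k * d.1) (j + k * d.2) == '#')

-- membership-sets: the directions found so far / newly at radius r
def pvAdds (data : List String) (i j : Int) (fnd : List Int) (r : Int) : List Int :=
  ((PySem.List.enumerate pvDirs 0).filter
    (fun e => pvHitB data i j e.2 r && !(fnd.contains e.1))).map Prod.fst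

def pvVisUpTo (data : List String) (i j : Int) (d : Int × Int) (t : Int) : Bool :=
  (PySem.List.pyRange 1 t).any (pvHitB data i j d)

def pvVisB (data : List String) (i j : Int) (d : Int × Int) : Bool :=
  (PySem.List.pyRange 1 (data.length : Int)).any (pvHitB data i j d)

theorem pv_inner_spec (data : List String) :
    ∀ (L : List (Int × (Int × Int))) (fnd : List Int) (stp : List Char),
      (L.map Prod.fst).Nodup →
      L.foldl (count_adjacent_step data) (fnd, stp) =
        (fnd ++ (L.filter (fun e => pvG data e.2 && (pvCell data e.2.1 e.2.2 == '#')
                                     && !(fnd.contains e.1))).map Prod.fst,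
         stp ++ (L.filter (fun e => pvG data e.2 && !(fnd.contains e.1))).map
           (fun e => pvCell data e.2.1 e.2.2)) := by
  intro L
  induction L with
  | nil => intro fnd stp _; simp
  | cons e L ih =>
    intro fnd stp hnd
    have hnotin : e.1 ∉ L.map Prod.fst := by
      rw [List.map_cons, List.nodup_cons] at hnd; exact hnd.1
    have hndL : (L.map Prod.fst).Nodup := by
      rw [List.map_cons, List.nodup_cons] at hnd; exact hnd.2
    have hcongr : ∀ (f : List Int), ∀ x ∈ L, ∀ b : Bool,
        (b && !((f ++ [e.1]).contains x.1)) = (b && !(f.contains x.1)) := by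
      intro f x hx b
      have : x.1 ≠ e.1 := by
        intro h; exact hnotin (h ▸ List.mem_map_of_mem hx)
      simp [this]
    rw [List.foldl_cons]
    by_cases hg : (0 ≤ e.2.1 ∧ e.2.1 < (data.length : Int) ∧ 0 ≤ e.2.2 ∧ e.2.2 < pvCols data)
    · by_cases hf : fnd.contains e.1
      · have hfm : e.1 ∈ fnd := by simpa using hf
        have hstep : count_adjacent_step data (fnd, stp) e = (fnd, stp) := by
          unfold count_adjacent_step
          rw [if_neg]; intro h; exact h.2.2.2.2 hf
        rw [hstep, ih fnd stp hndL,
          List.filter_cons_of_neg (by simp [hfm]),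
          List.filter_cons_of_neg (by simp [hfm])]
      · have hfm : e.1 ∉ fnd := by simpa using hf
        have hG : pvG data e.2 = true := by simp [pvG, hg]
        by_cases hash : pvCell data e.2.1 e.2.2 = '#'
        · have hstep : count_adjacent_step data (fnd, stp) e
              = (fnd ++ [e.1], stp ++ [pvCell data e.2.1 e.2.2]) := by
            unfold count_adjacent_step
            rw [if_pos ⟨hg.1, hg.2.1, hg.2.2.1, hg.2.2.2, hf⟩, if_pos hash]
          have hfix1 : L.filter (fun x => pvG data x.2 && (pvCell data x.2.1 x.2.2 == '#')
                && !((fnd ++ [e.1]).contains x.1))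
              = L.filter (fun x => pvG data x.2 && (pvCell data x.2.1 x.2.2 == '#')
                && !(fnd.contains x.1)) :=
            List.filter_congr (fun x hx => by rw [hcongr fnd x hx])
          have hfix2 : L.filter (fun x => pvG data x.2 && !((fnd ++ [e.1]).contains x.1))
              = L.filter (fun x => pvG data x.2 && !(fnd.contains x.1)) :=
            List.filter_congr (fun x hx => by rw [hcongr fnd x hx])
          rw [hstep, ih (fnd ++ [e.1]) (stp ++ [pvCell data e.2.1 e.2.2]) hndL, hfix1, hfix2,
            List.filter_cons_of_pos (by simp [hG, hash, hfm]),
            List.filter_cons_of_pos (by simp [hG, hfm])]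
          simp
        · have hstep : count_adjacent_step data (fnd, stp) e
              = (fnd, stp ++ [pvCell data e.2.1 e.2.2]) := by
            unfold count_adjacent_step
            rw [if_pos ⟨hg.1, hg.2.1, hg.2.2.1, hg.2.2.2, hf⟩, if_neg hash]
          rw [hstep, ih fnd (stp ++ [pvCell data e.2.1 e.2.2]) hndL,
            List.filter_cons_of_neg (by simp [hash]),
            List.filter_cons_of_pos (by simp [hG, hfm])]
          simp
    · have hstep : count_adjacent_step data (fnd, stp) e = (fnd, stp) := by
        unfold count_adjacent_step
        rw [if_neg]; intro h; exact hg ⟨h.1, h.2.1, h.2.2.1, h.2.2.2.1⟩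
      have hGf : pvG data e.2 = false := by simp [pvG]; intro h1 h2 h3; omega
      rw [hstep, ih fnd stp hndL,
        List.filter_cons_of_neg (by simp [hGf]),
        List.filter_cons_of_neg (by simp [hGf])]

theorem pv_enum_coords (x y r : Int) :
    PySem.List.enumerate [(y - r, x), (y, x + r), (y + r, x), (y, x - r),
      (y - r, x + r), (y - r, x - r), (y + r, x - r), (y + r, x + r)] 0
    = (PySem.List.enumerate pvDirs 0).map
        (fun e => (e.1, (y + r * e.2.1, x + r * e.2.2))) := by
  simp only [pvDirs, PySem.List.enumerate_cons, PySem.List.enumerate_nil, List.map_cons,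
    List.map_nil, List.cons.injEq, Prod.mk.injEq]
  norm_num
  and_intros <;> ring

theorem pv_radius_step (data : List String) (x y r : Int) (st : Int × List Int) :
    count_adjacent_radius data x y st r =
      (st.1 + ((pvAdds data y x st.2 r).length : Int), st.2 ++ pvAdds data y x st.2 r) := by
  show ((fun st r =>
      (st.1 + (PySem.List.count ((PySem.List.enumerate
          [(y - r, x), (y, x + r), (y + r, x), (y, x - r), (y - r, x + r), (y - r, x - r),
           (y + r, x - r), (y + r, x + r)]).foldl (count_adjacent_step data)
            (st.2, ([] : List Char))).2 '#' : Int),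
       ((PySem.List.enumerate
          [(y - r, x), (y, x + r), (y + r, x), (y, x - r), (y - r, x + r), (y - r, x - r),
           (y + r, x - r), (y + r, x + r)]).foldl (count_adjacent_step data)
            (st.2, ([] : List Char))).1)) st r)
    = _
  beta_reduce
  rw [pv_enum_coords, pv_inner_spec data _ st.2 [] (by
      rw [List.map_map]
      have h : (Prod.fst ∘ fun e : Int × (Int × Int) => (e.1, (y + r * e.2.1, x + r * e.2.2)))
          = Prod.fst := rfl
      rw [h]; decide)]
  dsimp only
  unfold pvAdds
  have hfix : ((PySem.List.enumerate pvDirs 0).filter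
        (fun e => pvHitB data y x e.2 r && !(st.2.contains e.1)))
      = ((PySem.List.enumerate pvDirs 0).filter
        ((fun e => pvG data e.2 && (pvCell data e.2.1 e.2.2 == '#') && !(st.2.contains e.1)) ∘
          (fun e => (e.1, (y + r * e.2.1, x + r * e.2.2))))) :=
    List.filter_congr (fun e he => by simp [pvHitB, Function.comp, Bool.and_assoc])
  rw [hfix]
  refine Prod.ext ?_ ?_
  · dsimp only
    congr 1
    rw [List.nil_append, PySem.List.count_eq, List.count_eq_countP, List.countP_map,
      List.countP_filter, List.length_map, ← List.countP_eq_length_filter, List.countP_map]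
    congr 1
    apply List.countP_congr
    intro e _
    simp [Function.comp, Bool.and_comm, Bool.and_left_comm]
  · dsimp only
    congr 1
    rw [List.filter_map, List.map_map]
    rfl

theorem pv_adds_nodup (data : List String) (i j : Int) (fnd : List Int) (r : Int) :
    (pvAdds data i j fnd r).Nodup := by
  unfold pvAdds
  have hsub : (List.filter (fun e => pvHitB data i j e.2 r && !fnd.contains e.1)
      (PySem.List.enumerate pvDirs 0)).Sublist (PySem.List.enumerate pvDirs 0) :=
    List.filter_sublist
  have hnd : ((PySem.List.enumerate pvDirs 0).map Prod.fst).Nodup := by decide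
  exact List.Nodup.sublist (List.Sublist.map Prod.fst hsub) hnd

theorem pv_mem_adds (data : List String) (i j : Int) (fnd : List Int) (r : Int) (d : Int) :
    d ∈ pvAdds data i j fnd r ↔
      (∃ e ∈ PySem.List.enumerate pvDirs 0, e.1 = d ∧ pvHitB data i j e.2 r = true) ∧ d ∉ fnd := by
  unfold pvAdds
  simp only [List.mem_map, List.mem_filter, Bool.and_eq_true, Bool.not_eq_true',
    List.contains_eq_mem, decide_eq_false_iff_not]
  constructor
  · rintro ⟨e, ⟨he, hh, hc⟩, rfl⟩
    exact ⟨⟨e, he, rfl, hh⟩, hc⟩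
  · rintro ⟨⟨e, he, rfl, hh⟩, hd⟩
    exact ⟨e, ⟨he, hh, hd⟩, rfl⟩

theorem pv_A_loop (data : List String) (x y : Int) : ∀ n : Nat,
    (((PySem.List.pyRange 1 (1 + (n : Int))).foldl (count_adjacent_radius data x y)
        ((0 : Int), ([] : List Int))).1
      = ((((PySem.List.pyRange 1 (1 + (n : Int))).foldl (count_adjacent_radius data x y)
        ((0 : Int), ([] : List Int))).2.length : Int)))
    ∧ (((PySem.List.pyRange 1 (1 + (n : Int))).foldl (count_adjacent_radius data x y)
        ((0 : Int), ([] : List Int))).2.Nodup)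
    ∧ (∀ d : Int, d ∈ (((PySem.List.pyRange 1 (1 + (n : Int))).foldl (count_adjacent_radius data x y)
        ((0 : Int), ([] : List Int))).2) ↔
        ∃ e ∈ PySem.List.enumerate pvDirs 0, e.1 = d ∧ pvVisUpTo data y x e.2 (1 + (n : Int)) = true) := by
  intro n
  induction n with
  | zero =>
    rw [show ((1 : Int) + ((0 : Nat) : Int)) = 1 by norm_num, PySem.List.pyRange_one_eq_nil le_rfl]
    refine ⟨rfl, List.nodup_nil, ?_⟩
    intro d
    simp [pvVisUpTo, PySem.List.pyRange_one_eq_nil (le_refl (1 : Int))]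
  | succ n ih =>
    obtain ⟨ih1, ih2, ih3⟩ := ih
    have h1n : (1 : Int) ≤ 1 + (n : Int) := by omega
    have hcast : (1 + (((n : Nat) + 1 : Nat) : Int) : Int) = (1 + (n : Int)) + 1 := by
      push_cast; ring
    rw [hcast, PySem.List.pyRange_one_succ_right h1n, List.foldl_append, List.foldl_cons,
      List.foldl_nil, pv_radius_step]
    set st := (PySem.List.pyRange 1 (1 + (n : Int))).foldl (count_adjacent_radius data x y)
      ((0 : Int), ([] : List Int)) with hst
    refine ⟨?_, ?_, ?_⟩
    · rw [ih1]
      simp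
    · rw [List.nodup_append]
      refine ⟨ih2, pv_adds_nodup data y x st.2 (1 + (n : Int)), ?_⟩
      intro a ha b hb hab
      subst hab
      exact ((pv_mem_adds data y x st.2 (1 + (n : Int)) a).1 hb).2 ha
    · intro d
      have hsplit : ∀ d' : Int × Int, pvVisUpTo data y x d' ((1 + (n : Int)) + 1)
          = (pvVisUpTo data y x d' (1 + (n : Int)) || pvHitB data y x d' (1 + (n : Int))) := by
        intro d'
        unfold pvVisUpTo
        rw [PySem.List.pyRange_one_succ_right h1n, List.any_append]
        simp
      simp only [List.mem_append, hsplit, Bool.or_eq_true]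
      rw [pv_mem_adds]
      constructor
      · rintro (hmem | ⟨⟨e, he, rfl, hh⟩, hnot⟩)
        · obtain ⟨e, he, hfst, hv⟩ := (ih3 d).1 hmem
          exact ⟨e, he, hfst, Or.inl hv⟩
        · exact ⟨e, he, rfl, Or.inr hh⟩
      · rintro ⟨e, he, rfl, hv | hh⟩
        · exact Or.inl ((ih3 e.1).2 ⟨e, he, rfl, hv⟩)
        · by_cases hd : e.1 ∈ st.2
          · exact Or.inl hd
          · exact Or.inr ⟨⟨e, he, rfl, hh⟩, hd⟩

theorem pv_enum_filter_length {α : Type} (p : α → Bool) :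
    ∀ (l : List α) (s : Int),
      (((PySem.List.enumerate l s).filter (fun e => p e.2)).map Prod.fst).length = l.countP p := by
  intro l
  induction l with
  | nil => intro s; simp [PySem.List.enumerate_nil]
  | cons a l ih =>
    intro s
    rw [PySem.List.enumerate_cons, List.countP_cons]
    by_cases h : p a = true
    · rw [List.filter_cons_of_pos (by simpa using h)]
      simp [ih (s + 1), h]
    · rw [List.filter_cons_of_neg (by simpa using h)]
      simp [ih (s + 1), h]

theorem pv_length_eq_of_mem_iff (l1 l2 : List Int) (h1 : l1.Nodup) (h2 : l2.Nodup)
    (h : ∀ x, x ∈ l1 ↔ x ∈ l2) : l1.length = l2.length := by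
  rw [← List.toFinset_card_of_nodup h1, ← List.toFinset_card_of_nodup h2]
  congr 1; ext a; simp [h a]

theorem pv_A_char (data : List String) (x y : Int) (hne : 0 < data.length) :
    count_adjacent_occupied data x y = (pvDirs.countP (pvVisB data y x) : Int) := by
  unfold count_adjacent_occupied
  obtain ⟨n, hn⟩ : ∃ n : Nat, data.length = n + 1 := ⟨data.length - 1, by omega⟩
  have hc : (data.length : Int) = 1 + (n : Int) := by rw [hn]; push_cast; ring
  rw [hc]
  obtain ⟨h1, h2, h3⟩ := pv_A_loop data x y n
  rw [h1]
  have hvis : ∀ e : Int × (Int × Int), pvVisUpTo data y x e.2 (1 + (n : Int)) = pvVisB data y x e.2 := by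
    intro e; unfold pvVisUpTo pvVisB; rw [hc]
  have hmemL : ∀ d : Int,
      d ∈ (((PySem.List.enumerate pvDirs 0).filter (fun e => pvVisB data y x e.2)).map Prod.fst) ↔
        ∃ e ∈ PySem.List.enumerate pvDirs 0, e.1 = d ∧ pvVisB data y x e.2 = true := by
    intro d
    simp only [List.mem_map, List.mem_filter]
    constructor
    · rintro ⟨e, ⟨he, hp⟩, rfl⟩; exact ⟨e, he, rfl, hp⟩
    · rintro ⟨e, he, rfl, hp⟩; exact ⟨e, ⟨he, hp⟩, rfl⟩
  have hndL : (((PySem.List.enumerate pvDirs 0).filter (fun e => pvVisB data y x e.2)).map Prod.fst).Nodup := by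
    have hsub : ((PySem.List.enumerate pvDirs 0).filter (fun e => pvVisB data y x e.2)).Sublist
        (PySem.List.enumerate pvDirs 0) := List.filter_sublist
    exact List.Nodup.sublist (List.Sublist.map Prod.fst hsub) (by decide)
  have hlen := pv_length_eq_of_mem_iff _ _ h2 hndL
    (fun d => by
      rw [h3 d, hmemL d]
      constructor
      · rintro ⟨e, he, rfl, hp⟩
        exact ⟨e, he, rfl, by rw [← hvis e]; exact hp⟩
      · rintro ⟨e, he, rfl, hp⟩
        exact ⟨e, he, rfl, by rw [hvis e]; exact hp⟩)
  rw [hlen]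
  congr 1
  exact pv_enum_filter_length (pvVisB data y x) pvDirs 0

theorem pv_sees_any (data : List String) (i j dy dx : Int) :
    ∀ ks : List Int,
      pvSees data (data.length : Int) (pvCols data) i j dy dx ks
        = ks.any (fun k => pvHitB data i j (dy, dx) k) := by
  intro ks
  induction ks with
  | nil => rfl
  | cons k ks ih =>
    rw [List.any_cons]
    by_cases hc : ((0 ≤ i + k * dy ∧ i + k * dy < (data.length : Int)
        ∧ 0 ≤ j + k * dx ∧ j + k * dx < pvCols data)
        ∧ pvCell data (i + k * dy) (j + k * dx) = '#')
    · have hsee : pvSees data (data.length : Int) (pvCols data) i j dy dx (k :: ks) = true := by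
        simp [pvSees, hc.1, hc.2]
      have hhit : pvHitB data i j (dy, dx) k = true := by
        simp [pvHitB, pvG, hc.1, hc.2]
      rw [hsee, hhit]
      simp
    · have hsee : pvSees data (data.length : Int) (pvCols data) i j dy dx (k :: ks)
          = pvSees data (data.length : Int) (pvCols data) i j dy dx ks := by
        simp only [pvSees]
        rw [if_neg hc]
      have hhit : pvHitB data i j (dy, dx) k = false := by
        simp only [pvHitB, pvG, Bool.and_eq_false_iff]
        by_cases hb : (0 ≤ i + k * dy ∧ i + k * dy < (data.length : Int)
            ∧ 0 ≤ j + k * dx ∧ j + k * dx < pvCols data)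
        · right
          have : ¬ pvCell data (i + k * dy) (j + k * dx) = '#' := fun hh => hc ⟨hb, hh⟩
          simpa using this
        · left; simpa using hb
      rw [hsee, hhit, ih]
      simp

theorem pv_seat (data : List String) (i j : Int) (hne : 0 < data.length) :
    count_adjacent_occupied data j i =
      (pvDirs.countP (fun d => pvSees data (data.length : Int) (pvCols data) i j d.1 d.2
        (PySem.List.pyRange 1 (data.length : Int))) : Int) := by
  rw [pv_A_char data j i hne]
  congr 1
  apply List.countP_congr
  intro d hdm
  have hb := pv_sees_any data i j d.1 d.2 (PySem.List.pyRange 1 (data.length : Int))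
  rw [hb]
  simp [pvVisB, Prod.mk.eta]

-- ===== VERDICT (by name: the statement is the Claim_ definition above) =====
theorem occupied_rule_spec : Claim_equal_occupied_rule := by
  intro data _ hpre
  unfold Spec_occupied_rule occupied_rule occupied_rule_alt
  by_cases hemp : data = []
  · subst hemp
    simp [PySem.List.enumerate_nil]
  · have hne : 0 < data.length := List.length_pos_iff.2 hemp
    have hcols : (if data ≠ [] then pvCols data else 0) = pvCols data := if_pos hemp
    rw [hcols]
    apply PySem.List.foldl_congr_mem
    intro acc ir hir
    apply PySem.List.foldl_congr_mem
    intro acc2 js hjs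
    have hcount := pv_seat data ir.1 js.1 hne
    rw [hcount]
    have h5 : ((5 : Int) ≤ (((pvDirs.countP (fun d => pvSees data (data.length : Int)
        (pvCols data) ir.1 js.1 d.1 d.2 (PySem.List.pyRange 1 (data.length : Int)))) : Nat) : Int))
        ↔ 5 ≤ pvDirs.countP (fun d => pvSees data (data.length : Int) (pvCols data) ir.1 js.1
            d.1 d.2 (PySem.List.pyRange 1 (data.length : Int))) := by
      exact_mod_cast Iff.rfl
    split_ifs <;> first
      | rfl
      | (exfalso; tauto)
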